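-- pv_equiv track=rewrite | github.com/hanzala-sohrab/CP | Codeforces/2146B.py | is_possible
-- ===== SOURCE A (Python) =====
-- from typing import List, Set
--
-- def is_possible(n: int, m: int, sets: List[Set[int]]) -> bool:
--     freq = [0] * (m + 1)
--     for s in sets:
--         for el in s:
--             freq[el] += 1
--
--     for i in range(1, m + 1):
--         if freq[i] == 0:
--             return False
--
--     union_set = set.union(*sets)
--
--     cnt = 1
--
--     for s in sets:
--         flag = True
--         for el in s:
--             freq[el] -= 1
--             if freq[el] == 0:
--                 flag = False
--
--         if flag:
--             cnt += 1
--
--         for el in s: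
--             freq[el] += 1
--
--     return cnt >= 3
-- ===== SOURCE B (Python) =====
-- def is_possible(n, m, sets):
--     # One pass: freq[x] = multiplicity of slot x, owner[x] = index of the last set writing slot x.
--     freq = [0] * (m + 1)
--     owner = [None] * (m + 1)
--     for i, s in enumerate(sets):
--         for el in s:
--             freq[el] += 1
--             owner[el] = i
--     # Coverage: every element 1..m must occur somewhere.
--     if any(freq[x] == 0 for x in range(1, m + 1)):
--         return False
--     # A set is non-redundant iff it owns some slot of multiplicity 1.
--     essential = {owner[x] for x in range(m + 1) if freq[x] == 1}
--     return len(sets) - len(essential) >= 2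
-- ===== Notes on version B (the rewrite author's own statement) =====
-- stated objective: alternative
-- what changed: Instead of A's three passes over the family (count into freq, then re-scan every set with a decrement/restore pass to test redundancy, then restore), B makes one pass filling freq together with an owner array (index of the last set writing each slot) and then classifies sets by a single scan over the slot space 0..m: the owners of multiplicity-1 slots are exactly the non-redundant sets, so the answer is len(sets) - len(essential) >= 2.
-- outside the precondition, e.g. on is_possible(2, 1, [{0, 1, -2, -1}, {-1}]): A returns False, B returns True
import Mathlib
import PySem

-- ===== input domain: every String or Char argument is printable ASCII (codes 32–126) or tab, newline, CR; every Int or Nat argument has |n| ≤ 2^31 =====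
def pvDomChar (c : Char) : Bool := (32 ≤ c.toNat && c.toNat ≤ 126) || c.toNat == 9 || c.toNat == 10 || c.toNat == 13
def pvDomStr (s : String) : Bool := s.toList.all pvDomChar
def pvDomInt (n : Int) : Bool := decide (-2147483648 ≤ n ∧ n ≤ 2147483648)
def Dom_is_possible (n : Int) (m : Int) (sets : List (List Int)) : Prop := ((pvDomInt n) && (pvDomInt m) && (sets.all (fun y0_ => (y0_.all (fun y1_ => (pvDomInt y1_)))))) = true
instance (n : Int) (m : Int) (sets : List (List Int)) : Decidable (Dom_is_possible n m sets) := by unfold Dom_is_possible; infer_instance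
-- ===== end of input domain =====

-- B replaces A's three passes (count array; per-set decrement/restore re-scan; restore) by one
-- pass that also records each slot's last owner, then classifies sets by a single scan over the
-- slot space 0..m; alternative decomposition, not claimed faster.


-- ===== PORT A =====
-- Python list index for an array of length m+1: a negative index wraps (exact for -(m+1) ≤ i ≤ m).
def pvIdx (m : Int) (el : Int) : Int := if el < 0 then el + (m + 1) else el

-- 'for el in s: freq[el] += 1' (also the restore loop)
def pvIncAll (m : Int) (f : Int → Int) (s : List Int) : Int → Int :=
  s.foldl (fun f el => Function.update f (pvIdx m el) (f (pvIdx m el) + 1)) f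

def is_possible (n : Int) (m : Int) (sets : List (List Int)) : Bool :=
  let freq : Int → Int := sets.foldl (pvIncAll m) (fun _ => 0)
  if (PySem.List.pyRange 1 (m + 1) 1).any (fun i => freq i == 0) then false
  else
    let _union := PySem.Set.ofList sets.flatten
    let st := sets.foldl (fun (st : (Int → Int) × Int) s =>
      let p := s.foldl (fun (q : (Int → Int) × Bool) el =>
          let f2 := Function.update q.1 (pvIdx m el) (q.1 (pvIdx m el) - 1)
          (f2, if f2 (pvIdx m el) == 0 then false else q.2)) (st.1, true)
      let cnt := if p.2 then st.2 + 1 else st.2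
      (pvIncAll m p.1 s, cnt)) (freq, (1 : Int))
    decide (st.2 ≥ 3)

-- ===== PORT B =====
def is_possible_alt (n : Int) (m : Int) (sets : List (List Int)) : Bool :=
  let fo := (PySem.List.enumerate sets 0).foldl (fun (q : (Int → Int) × (Int → Option Int)) p =>
      p.2.foldl (fun (q : (Int → Int) × (Int → Option Int)) el =>
          (Function.update q.1 (pvIdx m el) (q.1 (pvIdx m el) + 1),
           Function.update q.2 (pvIdx m el) (some p.1))) q)
    ((fun _ => 0), (fun _ => none))
  let freq := fo.1
  let owner := fo.2
  if (PySem.List.pyRange 1 (m + 1) 1).any (fun x => freq x == 0) then false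
  else
    let essential : PySem.Set (Option Int) :=
      (PySem.List.pyRange 0 (m + 1) 1).foldl
        (fun es x => if freq x == 1 then PySem.Set.add es (owner x) else es) PySem.Set.empty
    decide ((sets.length : Int) - (essential.length : Int) ≥ 2)

-- ===== PRECONDITION & SPEC =====
-- Pre_ excludes: (i) an empty family with m <= 0, where A raises TypeError at set.union(*sets)
-- (with m >= 1 an empty family just fails the coverage check and stays inside); (ii) elements
-- outside -(m+1)..m, where A raises IndexError; (iii) sets in which two entries land on the same
-- freq slot after Python's negative-index wrap (el and el-(m+1) together, or duplicate entries,
-- which do not represent Python sets) — what A returns there is an artefact of the aliased slot.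
def Pre_is_possible (n : Int) (m : Int) (sets : List (List Int)) : Prop :=
  (sets = [] → 1 ≤ m) ∧
    ∀ s ∈ sets, (s.map (pvIdx m)).Nodup ∧ ∀ el ∈ s, -(m + 1) ≤ el ∧ el ≤ m
instance (n : Int) (m : Int) (sets : List (List Int)) : Decidable (Pre_is_possible n m sets) := by
  unfold Pre_is_possible; infer_instance
def pvWitness_is_possible : Int × Int × List (List Int) := (3, 2, [[1], [2], [1, 2]])

def Spec_is_possible (n : Int) (m : Int) (sets : List (List Int)) (out : Bool) : Prop := out = is_possible_alt n m sets
instance (n : Int) (m : Int) (sets : List (List Int)) (out : Bool) : Decidable (Spec_is_possible n m sets out) := by unfold Spec_is_possible; infer_instance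

-- ===== CLAIM (what is proved, stated in full; the proofs are below) =====
def Claim_equal_is_possible : Prop := ∀ (n : Int) (m : Int) (sets : List (List Int)), Dom_is_possible n m sets → Pre_is_possible n m sets → Spec_is_possible n m sets (is_possible n m sets)

-- ===== LEMMAS AND PROOFS =====

def pvIncAllK (f : Int → Int) (ks : List Int) : Int → Int :=
  ks.foldl (fun f k => Function.update f k (f k + 1)) f

theorem pvIncAll_eq_k (m : Int) (f : Int → Int) (s : List Int) :
    pvIncAll m f s = pvIncAllK f (s.map (pvIdx m)) := by
  unfold pvIncAll pvIncAllK
  rw [List.foldl_map]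

theorem pvIncAllK_eq (ks : List Int) : ∀ (f : Int → Int),
    pvIncAllK f ks = fun x => f x + (ks.count x : Int) := by
  induction ks with
  | nil => intro f; funext x; simp [pvIncAllK]
  | cons a t ih =>
    intro f
    show pvIncAllK (Function.update f a (f a + 1)) t = _
    rw [ih]
    funext x
    by_cases hx : x = a
    · subst hx
      simp [Function.update, List.count_cons]
      ring
    · simp [Function.update, hx, List.count_cons, Ne.symm hx]

def pvKsets (m : Int) (sets : List (List Int)) : List (List Int) :=
  sets.map (fun s => s.map (pvIdx m))

theorem pvFreq_eq (m : Int) (sets : List (List Int)) : ∀ (f : Int → Int),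
    sets.foldl (pvIncAll m) f = fun x => f x + (((pvKsets m sets).flatten.count x : Nat) : Int) := by
  induction sets with
  | nil => intro f; funext x; simp [pvKsets]
  | cons s t ih =>
    intro f
    show t.foldl (pvIncAll m) (pvIncAll m f s) = _
    rw [ih, pvIncAll_eq_k, pvIncAllK_eq]
    funext x
    have : (pvKsets m (s :: t)).flatten = s.map (pvIdx m) ++ (pvKsets m t).flatten := by
      simp [pvKsets]
    rw [this, List.count_append]
    push_cast; ring

theorem pvDecFlag_eq (ks : List Int) : ∀ (f : Int → Int) (b : Bool), ks.Nodup →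
    ks.foldl (fun (q : (Int → Int) × Bool) k =>
        let f2 := Function.update q.1 k (q.1 k - 1)
        (f2, if f2 k == 0 then false else q.2)) (f, b)
      = (fun x => f x - (ks.count x : Int), b && !ks.any (fun k => f k == 1)) := by
  induction ks with
  | nil => intro f b _; simp
  | cons a t ih =>
    intro f b hnd
    rcases List.nodup_cons.mp hnd with ⟨ha, hndt⟩
    show t.foldl _ (Function.update f a (f a - 1),
        if Function.update f a (f a - 1) a == 0 then false else b) = _
    rw [ih _ _ hndt]
    have hupd : Function.update f a (f a - 1) a = f a - 1 := by simp
    refine Prod.ext ?_ ?_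
    · funext x
      by_cases hx : x = a
      · subst hx
        simp [Function.update, List.count_eq_zero_of_not_mem ha, List.count_cons]
      · simp [Function.update, hx, List.count_cons, Ne.symm hx]
    · show ((if Function.update f a (f a - 1) a == 0 then false else b) &&
        !t.any (fun k => Function.update f a (f a - 1) k == 1))
        = (b && !(a :: t).any (fun k => f k == 1))
      rw [hupd]
      have h1 : (t.any (fun k => Function.update f a (f a - 1) k == 1))
          = t.any (fun k => f k == 1) :=
        PySem.List.any_congr_mem (fun x hx => by
          have : x ≠ a := fun h => ha (h ▸ hx)
          simp [Function.update, this])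
      rw [h1]
      have h2 : ((f a - 1 : Int) == 0) = (f a == 1) := by
        by_cases h : f a = 1 <;> simp [h] <;> omega
      rw [h2]
      cases hfa : (f a == 1 : Bool) <;> simp [List.any_cons, hfa]

theorem pvPhase2_eq (l : List (List Int)) : ∀ (F : Int → Int) (c : Int), (∀ ks ∈ l, ks.Nodup) →
    l.foldl (fun (st : (Int → Int) × Int) ks =>
        let p := ks.foldl (fun (q : (Int → Int) × Bool) k =>
            let f2 := Function.update q.1 k (q.1 k - 1)
            (f2, if f2 k == 0 then false else q.2)) (st.1, true)
        let cnt := if p.2 then st.2 + 1 else st.2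
        (pvIncAllK p.1 ks, cnt)) (F, c)
      = (F, c + (l.countP (fun ks => !(ks.any (fun k => F k == 1))) : Int)) := by
  induction l with
  | nil => intro F c _; simp
  | cons s t ih =>
    intro F c hnd
    have hstep : (let p := s.foldl (fun (q : (Int → Int) × Bool) k =>
            let f2 := Function.update q.1 k (q.1 k - 1)
            (f2, if f2 k == 0 then false else q.2)) (((F, c) : (Int → Int) × Int).1, true)
        let cnt := if p.2 then ((F, c) : (Int → Int) × Int).2 + 1 else ((F, c) : (Int → Int) × Int).2
        (pvIncAllK p.1 s, cnt))
        = (F, if !(s.any (fun k => F k == 1)) then c + 1 else c) := by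
      have hp := pvDecFlag_eq s F true (hnd s (List.mem_cons_self))
      show (pvIncAllK (s.foldl _ ((F, c).1, true)).1 s, _) = _
      rw [show ((F, c) : (Int → Int) × Int).1 = F from rfl, hp]
      refine Prod.ext ?_ ?_
      · show pvIncAllK (fun x => F x - (s.count x : Int)) s = F
        rw [pvIncAllK_eq]; funext x; ring
      · simp
    rw [List.foldl_cons, hstep, ih _ _ (fun s hs => hnd s (List.mem_cons_of_mem _ hs))]
    rw [List.countP_cons]
    cases hfa : s.any (fun k => F k == 1) <;> simp [hfa] <;> push_cast <;> ring

def pvOwnUpd (i : Int) (o : Int → Option Int) (ks : List Int) : Int → Option Int :=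
  ks.foldl (fun o k => Function.update o k (some i)) o

def pvOwnF (ps : List (Int × List Int)) (o : Int → Option Int) : Int → Option Int :=
  ps.foldl (fun o p => pvOwnUpd p.1 o p.2) o

def pvFlatSnd (ps : List (Int × List Int)) : List Int := (ps.map (·.2)).flatten

theorem pvMem_flatSnd (ps : List (Int × List Int)) (x : Int) :
    x ∈ pvFlatSnd ps ↔ ∃ p ∈ ps, x ∈ p.2 := by
  induction ps with
  | nil => simp [pvFlatSnd]
  | cons q t ih =>
    have h : pvFlatSnd (q :: t) = q.2 ++ pvFlatSnd t := by simp [pvFlatSnd]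
    rw [h, List.mem_append, ih]
    constructor
    · rintro (hx | ⟨p, hp, hxp⟩)
      · exact ⟨q, List.mem_cons_self, hx⟩
      · exact ⟨p, List.mem_cons_of_mem _ hp, hxp⟩
    · rintro ⟨p, hp, hxp⟩
      rcases List.mem_cons.mp hp with rfl | hpt
      · exact Or.inl hxp
      · exact Or.inr ⟨p, hpt, hxp⟩

theorem pvOwnUpd_not_mem (i : Int) (ks : List Int) : ∀ (o : Int → Option Int) (x : Int),
    x ∉ ks → pvOwnUpd i o ks x = o x := by
  induction ks with
  | nil => intro o x _; rfl
  | cons a t ih =>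
    intro o x hx
    show pvOwnUpd i (Function.update o a (some i)) t x = o x
    rw [ih _ _ (fun h => hx (List.mem_cons_of_mem _ h))]
    exact Function.update_of_ne (fun h : x = a => hx (h ▸ List.mem_cons_self)) _ _

theorem pvOwnUpd_mem (i : Int) (ks : List Int) : ∀ (o : Int → Option Int) (x : Int),
    x ∈ ks → pvOwnUpd i o ks x = some i := by
  induction ks with
  | nil => intro o x hx; simp at hx
  | cons a t ih =>
    intro o x hx
    show pvOwnUpd i (Function.update o a (some i)) t x = some i
    by_cases hxt : x ∈ t
    · exact ih _ _ hxt
    · have hxa : x = a := by rcases List.mem_cons.mp hx with h | h; exact h; exact absurd h hxt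
      subst hxa
      rw [pvOwnUpd_not_mem _ _ _ _ hxt]
      simp

theorem pvOwnF_not_mem (ps : List (Int × List Int)) : ∀ (o : Int → Option Int) (x : Int),
    x ∉ pvFlatSnd ps → pvOwnF ps o x = o x := by
  induction ps with
  | nil => intro o x _; rfl
  | cons p t ih =>
    intro o x hx
    have h1 : x ∉ p.2 := fun h =>
      hx ((pvMem_flatSnd _ _).mpr ⟨p, List.mem_cons_self, h⟩)
    have h2 : x ∉ pvFlatSnd t := fun h => by
      rcases (pvMem_flatSnd _ _).mp h with ⟨q, hq, hxq⟩
      exact hx ((pvMem_flatSnd _ _).mpr ⟨q, List.mem_cons_of_mem _ hq, hxq⟩)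
    show pvOwnF t (pvOwnUpd p.1 o p.2) x = o x
    rw [ih _ _ h2, pvOwnUpd_not_mem _ _ _ _ h1]

theorem pvOwnF_owner (ps : List (Int × List Int)) : ∀ (o : Int → Option Int) (x : Int)
    (p : Int × List Int), (pvFlatSnd ps).count x = 1 → p ∈ ps → x ∈ p.2 →
    pvOwnF ps o x = some p.1 := by
  induction ps with
  | nil => intro o x p _ hp _; simp at hp
  | cons q t ih =>
    intro o x p hcnt hp hxp
    have hsplit : pvFlatSnd (q :: t) = q.2 ++ pvFlatSnd t := by simp [pvFlatSnd]
    rw [hsplit, List.count_append] at hcnt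
    rcases List.mem_cons.mp hp with rfl | hpt
    · have hq : 1 ≤ p.2.count x := List.one_le_count_iff.mpr hxp
      have hxt : x ∉ pvFlatSnd t := by
        intro h
        have := List.one_le_count_iff.mpr h
        omega
      show pvOwnF t (pvOwnUpd p.1 o p.2) x = some p.1
      rw [pvOwnF_not_mem _ _ _ hxt]
      exact pvOwnUpd_mem _ _ _ _ hxp
    · have ht : 1 ≤ (pvFlatSnd t).count x :=
        List.one_le_count_iff.mpr ((pvMem_flatSnd t x).mpr ⟨p, hpt, hxp⟩)
      have hxq : x ∉ q.2 := List.count_eq_zero.mp (by omega)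
      show pvOwnF t (pvOwnUpd q.1 o q.2) x = some p.1
      exact ih _ _ _ (by omega) hpt hxp

theorem pvRangeFilter_len {α : Type} (l : List α) (dflt : α) (q : α → Bool) :
    ((List.range l.length).filter (fun k => q (l.getD k dflt))).length = l.countP q := by
  induction l with
  | nil => simp
  | cons a t ih =>
    show ((List.range (t.length + 1)).filter _).length = _
    rw [List.range_succ_eq_map, List.filter_cons]
    have h : (List.filter (fun k => q ((a :: t).getD k dflt)) (List.map Nat.succ (List.range t.length)))
        = List.map Nat.succ (List.filter (fun k => q (t.getD k dflt)) (List.range t.length)) := by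
      rw [List.filter_map]
      congr 1
    rw [h]
    have h0 : (a :: t).getD 0 dflt = a := rfl
    rw [h0, List.countP_cons]
    cases hq : q a <;> simp [hq] <;> simpa using ih

def pvKps (m : Int) (sets : List (List Int)) : List (Int × List Int) :=
  (PySem.List.enumerate sets 0).map (fun p => (p.1, p.2.map (pvIdx m)))

theorem pvFlatSnd_kps (m : Int) (sets : List (List Int)) :
    pvFlatSnd (pvKps m sets) = (pvKsets m sets).flatten := by
  unfold pvFlatSnd pvKps pvKsets
  rw [List.map_map]
  rw [show ((fun x : Int × List Int => x.2) ∘ fun p : Int × List Int => (p.1, p.2.map (pvIdx m)))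
      = ((fun s : List Int => s.map (pvIdx m)) ∘ fun x : Int × List Int => x.2) from rfl]
  rw [← List.map_map, PySem.List.map_snd_enumerate]

theorem pvEssential_len (m : Int) (sets : List (List Int))
    (hbnd : ∀ s ∈ sets, ∀ el ∈ s, -(m + 1) ≤ el ∧ el ≤ m) :
    ((PySem.List.pyRange 0 (m + 1) 1).foldl
        (fun es x => if (((pvKsets m sets).flatten.count x : Nat) : Int) == 1
          then PySem.Set.add es (pvOwnF (pvKps m sets) (fun _ => none) x) else es)
        PySem.Set.empty).length
      = sets.countP
        (fun s => (s.map (pvIdx m)).any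
          (fun k => (((pvKsets m sets).flatten.count k : Nat) : Int) == 1)) := by
  have hE : ((PySem.List.pyRange 0 (m + 1) 1).foldl
        (fun es x => if (((pvKsets m sets).flatten.count x : Nat) : Int) == 1
          then PySem.Set.add es (pvOwnF (pvKps m sets) (fun _ => none) x) else es)
        PySem.Set.empty)
      = PySem.Set.ofList
        (((PySem.List.pyRange 0 (m + 1) 1).filter
            (fun x => (((pvKsets m sets).flatten.count x : Nat) : Int) == 1)).map
          (pvOwnF (pvKps m sets) (fun _ => none))) := by
    rw [PySem.List.foldl_if_eq_foldl_filter, ← PySem.Set.update_map_eq_foldl_add]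
    exact PySem.Set.update_nil_left _
  rw [hE]
  have hmem : ∀ j : Option Int,
      (j ∈ PySem.Set.ofList
        (((PySem.List.pyRange 0 (m + 1) 1).filter
            (fun x => (((pvKsets m sets).flatten.count x : Nat) : Int) == 1)).map
          (pvOwnF (pvKps m sets) (fun _ => none))))
      ↔ ∃ k : Nat, ∃ _h : k < sets.length, j = some (k : Int) ∧
          ((sets[k].map (pvIdx m)).any
            (fun x => (((pvKsets m sets).flatten.count x : Nat) : Int) == 1)) = true := by
    intro j
    rw [PySem.Set.mem_ofList]
    constructor
    · intro hj
      rcases List.mem_map.mp hj with ⟨x, hxf, hj2⟩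
      rcases List.mem_filter.mp hxf with ⟨_hxr, hFx⟩
      have hc1 : ((pvKsets m sets).flatten.count x : Nat) = 1 := by
        have := beq_iff_eq.mp hFx
        exact_mod_cast this
      have hxflat : x ∈ pvFlatSnd (pvKps m sets) := by
        rw [pvFlatSnd_kps]
        exact List.one_le_count_iff.mp (by omega)
      rcases (pvMem_flatSnd _ _).mp hxflat with ⟨q, hq, hxq⟩
      have hown : pvOwnF (pvKps m sets) (fun _ => none) x = some q.1 :=
        pvOwnF_owner _ _ _ _ (by rw [pvFlatSnd_kps]; exact hc1) hq hxq
      rcases List.mem_map.mp hq with ⟨p, hpe, hpq⟩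
      rcases (PySem.List.mem_enumerate_iff sets 0 p).mp hpe with ⟨k, hk, hp2⟩
      refine ⟨k, hk, ?_, ?_⟩
      · rw [← hj2, hown, ← hpq, hp2]; simp
      · apply List.any_eq_true.mpr
        refine ⟨x, ?_, by simp [hc1]⟩
        have : q.2 = sets[k].map (pvIdx m) := by rw [← hpq, hp2]
        rw [← this]; exact hxq
    · rintro ⟨k, hk, rfl, hany⟩
      rcases List.any_eq_true.mp hany with ⟨x, hx, hbeq⟩
      have hc1 : ((pvKsets m sets).flatten.count x : Nat) = 1 := by
        have := beq_iff_eq.mp hbeq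
        exact_mod_cast this
      have hq : ((k : Int), sets[k].map (pvIdx m)) ∈ pvKps m sets := by
        apply List.mem_map.mpr
        refine ⟨((k : Int), sets[k]), (PySem.List.mem_enumerate_iff sets 0 _).mpr ⟨k, hk, by simp⟩, rfl⟩
      have hown : pvOwnF (pvKps m sets) (fun _ => none) x = some (k : Int) :=
        pvOwnF_owner _ _ _ (((k : Int), sets[k].map (pvIdx m)))
          (by rw [pvFlatSnd_kps]; exact hc1) hq hx
      apply List.mem_map.mpr
      refine ⟨x, List.mem_filter.mpr ⟨?_, by simp [hc1]⟩, hown⟩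
      rcases List.mem_map.mp hx with ⟨el, hel, rfl⟩
      have hb := hbnd sets[k] (List.getElem_mem hk) el hel
      apply PySem.List.mem_pyRange_one.mpr
      unfold pvIdx
      split_ifs <;> omega
  have hT : (PySem.Set.ofList
        (((PySem.List.pyRange 0 (m + 1) 1).filter
            (fun x => (((pvKsets m sets).flatten.count x : Nat) : Int) == 1)).map
          (pvOwnF (pvKps m sets) (fun _ => none)))).Perm
      (((List.range sets.length).filter
          (fun k => ((sets.getD k []).map (pvIdx m)).any
            (fun x => (((pvKsets m sets).flatten.count x : Nat) : Int) == 1))).map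
        (fun (k : Nat) => some ((k : Int)))) := by
    apply (List.perm_ext_iff_of_nodup (PySem.Set.nodup_ofList _) ?_).mpr
    · intro j
      rw [hmem j]
      constructor
      · rintro ⟨k, hk, rfl, hbad⟩
        apply List.mem_map.mpr
        refine ⟨k, List.mem_filter.mpr ⟨List.mem_range.mpr hk, ?_⟩, rfl⟩
        rw [List.getD_eq_getElem _ _ hk]; exact hbad
      · intro hj
        rcases List.mem_map.mp hj with ⟨k, hkf, rfl⟩
        rcases List.mem_filter.mp hkf with ⟨hkr, hbad⟩
        have hk := List.mem_range.mp hkr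
        exact ⟨k, hk, rfl, by rw [← List.getD_eq_getElem _ _ hk]; exact hbad⟩
    · refine List.Nodup.map ?_ (List.Nodup.filter _ List.nodup_range)
      intro a b hab
      have : ((a : Int)) = ((b : Int)) := Option.some_injective _ hab
      exact_mod_cast this
  rw [hT.length_eq, List.length_map]
  exact pvRangeFilter_len sets []
    (fun s => (s.map (pvIdx m)).any (fun k => (((pvKsets m sets).flatten.count k : Nat) : Int) == 1))

theorem pvMain (n m : Int) (sets : List (List Int))
    (hnd : ∀ s ∈ sets, (s.map (pvIdx m)).Nodup)
    (hbnd : ∀ s ∈ sets, ∀ el ∈ s, -(m + 1) ≤ el ∧ el ≤ m) :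
    is_possible n m sets = is_possible_alt n m sets := by
  have hfo : ((PySem.List.enumerate sets 0).foldl
        (fun (q : (Int → Int) × (Int → Option Int)) p =>
          p.2.foldl (fun (q : (Int → Int) × (Int → Option Int)) el =>
              (Function.update q.1 (pvIdx m el) (q.1 (pvIdx m el) + 1),
               Function.update q.2 (pvIdx m el) (some p.1))) q)
        ((fun _ => 0), (fun _ => none)))
      = (sets.foldl (pvIncAll m) (fun _ => 0), pvOwnF (pvKps m sets) (fun _ => none)) := by
    have h1 : ∀ (q : (Int → Int) × (Int → Option Int)) (p : Int × List Int),
        p ∈ PySem.List.enumerate sets 0 →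
        (p.2.foldl (fun (q : (Int → Int) × (Int → Option Int)) el =>
            (Function.update q.1 (pvIdx m el) (q.1 (pvIdx m el) + 1),
             Function.update q.2 (pvIdx m el) (some p.1))) q)
          = (pvIncAll m q.1 p.2, pvOwnUpd p.1 q.2 (p.2.map (pvIdx m))) := by
      intro q p _
      obtain ⟨qf, qo⟩ := q
      rw [PySem.List.foldl_prod_mk
        (f := fun (f : Int → Int) (el : Int) => Function.update f (pvIdx m el) (f (pvIdx m el) + 1))
        (g := fun (o : Int → Option Int) (el : Int) => Function.update o (pvIdx m el) (some p.1))]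
      refine Prod.ext rfl ?_
      show p.2.foldl (fun (o : Int → Option Int) el => Function.update o (pvIdx m el) (some p.1)) qo = _
      unfold pvOwnUpd
      rw [List.foldl_map]
    rw [PySem.List.foldl_congr_mem _ _ (fun q p => (pvIncAll m q.1 p.2, pvOwnUpd p.1 q.2 (p.2.map (pvIdx m)))) _ h1]
    rw [PySem.List.foldl_prod_mk
      (f := fun (a : Int → Int) (p : Int × List Int) => pvIncAll m a p.2)
      (g := fun (o : Int → Option Int) (p : Int × List Int) => pvOwnUpd p.1 o (p.2.map (pvIdx m)))]
    refine Prod.ext ?_ ?_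
    · show (PySem.List.enumerate sets 0).foldl (fun a p => pvIncAll m a p.2) (fun _ => 0) = _
      conv_rhs => rw [← PySem.List.map_snd_enumerate sets 0]
      rw [List.foldl_map]
    · show (PySem.List.enumerate sets 0).foldl
          (fun o p => pvOwnUpd p.1 o (p.2.map (pvIdx m))) (fun _ => none) = _
      unfold pvOwnF pvKps
      rw [List.foldl_map]
  have hfreqA : sets.foldl (pvIncAll m) (fun _ => 0)
      = fun x => (((pvKsets m sets).flatten.count x : Nat) : Int) := by
    rw [pvFreq_eq]; funext x; simp
  have hndK : ∀ ks ∈ pvKsets m sets, ks.Nodup := by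
    intro ks hks
    rcases List.mem_map.mp hks with ⟨s, hs, rfl⟩
    exact hnd s hs
  have hbody : ∀ (st : (Int → Int) × Int) (s : List Int),
      (let p := (s.map (pvIdx m)).foldl (fun (q : (Int → Int) × Bool) k =>
            let f2 := Function.update q.1 k (q.1 k - 1)
            (f2, if f2 k == 0 then false else q.2)) (st.1, true)
       let cnt := if p.2 then st.2 + 1 else st.2
       (pvIncAllK p.1 (s.map (pvIdx m)), cnt))
      = (let p := s.foldl (fun (q : (Int → Int) × Bool) el =>
            (Function.update q.1 (pvIdx m el) (q.1 (pvIdx m el) - 1),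
             if Function.update q.1 (pvIdx m el) (q.1 (pvIdx m el) - 1) (pvIdx m el) == 0 then false
             else q.2)) (st.1, true)
         let cnt := if p.2 then st.2 + 1 else st.2
         (pvIncAll m p.1 s, cnt)) := by
    intro st s
    simp only [List.foldl_map, pvIncAll_eq_k]
  simp only [is_possible, is_possible_alt, hfo, hfreqA]
  by_cases hc : ((PySem.List.pyRange 1 (m + 1) 1).any
      (fun i => (((pvKsets m sets).flatten.count i : Nat) : Int) == 0)) = true
  · rw [if_pos hc, if_pos hc]
  · rw [if_neg hc, if_neg hc]
    have hA : sets.foldl (fun (st : (Int → Int) × Int) s =>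
        let p := s.foldl (fun (q : (Int → Int) × Bool) el =>
            (Function.update q.1 (pvIdx m el) (q.1 (pvIdx m el) - 1),
             if Function.update q.1 (pvIdx m el) (q.1 (pvIdx m el) - 1) (pvIdx m el) == 0 then false
             else q.2)) (st.1, true)
        let cnt := if p.2 then st.2 + 1 else st.2
        (pvIncAll m p.1 s, cnt))
        ((fun x => (((pvKsets m sets).flatten.count x : Nat) : Int)), (1 : Int))
        = ((fun x => (((pvKsets m sets).flatten.count x : Nat) : Int)),
           1 + (sets.countP (fun s => !((s.map (pvIdx m)).any
              (fun k => (((pvKsets m sets).flatten.count k : Nat) : Int) == 1))) : Int)) := by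
      have h2 : sets.foldl (fun (st : (Int → Int) × Int) s =>
          let p := s.foldl (fun (q : (Int → Int) × Bool) el =>
              (Function.update q.1 (pvIdx m el) (q.1 (pvIdx m el) - 1),
               if Function.update q.1 (pvIdx m el) (q.1 (pvIdx m el) - 1) (pvIdx m el) == 0 then false
               else q.2)) (st.1, true)
          let cnt := if p.2 then st.2 + 1 else st.2
          (pvIncAll m p.1 s, cnt))
          ((fun x => (((pvKsets m sets).flatten.count x : Nat) : Int)), (1 : Int))
          = (pvKsets m sets).foldl (fun (st : (Int → Int) × Int) ks =>
          let p := ks.foldl (fun (q : (Int → Int) × Bool) k =>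
              let f2 := Function.update q.1 k (q.1 k - 1)
              (f2, if f2 k == 0 then false else q.2)) (st.1, true)
          let cnt := if p.2 then st.2 + 1 else st.2
          (pvIncAllK p.1 ks, cnt))
          ((fun x => (((pvKsets m sets).flatten.count x : Nat) : Int)), (1 : Int)) := by
        unfold pvKsets
        rw [List.foldl_map]
        exact (PySem.List.foldl_congr_mem _ _ _ _ (fun st s _ => (hbody st s))).symm
      have hcp : List.countP (fun ks => !(ks.any
            (fun k => (((pvKsets m sets).flatten.count k : Nat) : Int) == 1))) (pvKsets m sets)
          = List.countP (fun s => !((s.map (pvIdx m)).any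
            (fun k => (((pvKsets m sets).flatten.count k : Nat) : Int) == 1))) sets := by
        unfold pvKsets
        rw [List.countP_map]
        rfl
      rw [h2, pvPhase2_eq _ _ _ hndK, hcp]
    rw [hA, pvEssential_len m sets hbnd]
    simp only []
    rw [decide_eq_decide]
    have hle := List.countP_le_length
      (p := fun s => ((s.map (pvIdx m)).any
        (fun k => (((pvKsets m sets).flatten.count k : Nat) : Int) == 1))) (l := sets)
    have hsum := List.length_eq_countP_add_countP
      (fun s => ((s.map (pvIdx m)).any
        (fun k => (((pvKsets m sets).flatten.count k : Nat) : Int) == 1))) (l := sets)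
    have hnot : (List.countP (fun a => decide ¬((fun s => ((s.map (pvIdx m)).any
          (fun k => (((pvKsets m sets).flatten.count k : Nat) : Int) == 1))) a = true)) sets)
        = List.countP (fun s => !((s.map (pvIdx m)).any
          (fun k => (((pvKsets m sets).flatten.count k : Nat) : Int) == 1))) sets := by
      apply List.countP_congr
      intro a _
      simp
    rw [hnot] at hsum
    constructor
    · intro h; push_cast at *; omega
    · intro h; push_cast at *; omega

-- ===== VERDICT (by name: the statement is the Claim_ definition above) =====
theorem is_possible_spec : Claim_equal_is_possible := by
  intro n m sets _ hpre
  show is_possible n m sets = is_possible_alt n m sets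
  exact pvMain n m sets (fun s hs => (hpre.2 s hs).1) (fun s hs => (hpre.2 s hs).2)
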